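-- pv_equiv track=rewrite | github.com/toastdriven/friendlydb | friendlydb/user.py | _unify_people
-- ===== SOURCE A (Python) =====
-- def _unify_people(history):
--     people_set = set([])
--
--     for bits in history:
--         if bits[0] == 'Added':
--             people_set.add(bits[1])
--         else:
--             try:
--                 people_set.remove(bits[1])
--             except KeyError:
--                 pass
--
--     # If we didn't care about ordering, we could've just returned the
--     # set. Unfortunately, in proper date order gives a better user
--     # experience.
--     people = []
--
--     for bits in history:
--         if bits[1] in people_set:
--             people.append(bits[1])
--             # Remove the name from the set so we don't dupe it.
--             people_set.remove(bits[1])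
--
--     return people
-- ===== SOURCE B (Python) =====
-- def _unify_people(history):
--     # One pass: insertion-ordered dict of presence flags (last action wins,
--     # first occurrence fixes the order), then read the dict once.
--     present = {}
--     for action, name in history:
--         present[name] = (action == 'Added')
--     return [name for name, flag in present.items() if flag]
-- ===== Notes on version B (the rewrite author's own statement) =====
-- stated objective: simpler
-- what changed: Replaces the set-plus-second-history-scan with a single pass building an insertion-ordered dict of presence flags (last action wins), the output being the dict's flagged keys, so the second pass iterates distinct people instead of the history.
import Mathlib
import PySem

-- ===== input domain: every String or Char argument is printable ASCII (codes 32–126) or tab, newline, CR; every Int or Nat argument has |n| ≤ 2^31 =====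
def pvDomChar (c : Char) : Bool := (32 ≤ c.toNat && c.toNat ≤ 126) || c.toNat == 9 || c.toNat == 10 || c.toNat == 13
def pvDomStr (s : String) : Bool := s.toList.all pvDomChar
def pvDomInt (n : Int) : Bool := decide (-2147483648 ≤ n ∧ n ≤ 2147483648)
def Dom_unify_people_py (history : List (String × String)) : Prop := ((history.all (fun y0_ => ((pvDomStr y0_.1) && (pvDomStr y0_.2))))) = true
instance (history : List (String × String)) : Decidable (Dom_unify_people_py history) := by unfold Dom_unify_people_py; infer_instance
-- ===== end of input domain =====

-- B replaces A's set plus second scan of the history by one pass building an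
-- insertion-ordered dict of presence flags and reading the dict once (objective: simpler).

-- ===== PORT A =====
-- A's second loop: for bits in history: if bits[1] in people_set: append + remove.
-- (the 'remove' never raises here since membership was just checked, so discard is exact)
def unifyLoopA : List (String × String) → List String → PySem.Set String → List String
  | [], people, _ => people
  | bits :: rest, people, s =>
    if PySem.Set.contains s bits.2 then
      unifyLoopA rest (people ++ [bits.2]) (PySem.Set.discard s bits.2)
    else
      unifyLoopA rest people s

def unify_people_py (history : List (String × String)) : List String :=
  -- first loop: try/except-KeyError remove is exactly Set.discard
  let people_set : PySem.Set String :=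
    history.foldl (fun s bits =>
      if bits.1 == "Added" then PySem.Set.add s bits.2 else PySem.Set.discard s bits.2)
      PySem.Set.empty
  unifyLoopA history [] people_set

-- ===== PORT B =====
def unify_people_py_alt (history : List (String × String)) : List String :=
  let present : PySem.Dict String Bool :=
    history.foldl (fun d bits => d.insert bits.2 (bits.1 == "Added")) PySem.Dict.empty
  (present.items.filter (fun p => p.2)).map (fun p => p.1)

-- ===== PRECONDITION & SPEC =====
def Spec_unify_people_py (history : List (String × String)) (out : List String) : Prop := out = unify_people_py_alt history
instance (history : List (String × String)) (out : List String) : Decidable (Spec_unify_people_py history out) := by unfold Spec_unify_people_py; infer_instance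

-- ===== CLAIM (what is proved, stated in full; the proofs are below) =====
def Claim_equal_unify_people_py : Prop := ∀ (history : List (String × String)), Dom_unify_people_py history → Spec_unify_people_py history (unify_people_py history)

-- ===== LEMMAS AND PROOFS =====

-- filtering a list by membership in (discard s b) = filtering the list's discard by membership in s
lemma filter_mem_discard (L s : List String) (b : String) :
    L.filter (fun k => decide (k ∈ PySem.Set.discard s b)) =
      (PySem.Set.discard L b).filter (fun k => decide (k ∈ s)) := by
  simp only [PySem.Set.discard, List.filter_filter]
  refine List.filter_congr ?_
  intro x _
  by_cases h1 : x ∈ s <;> by_cases h2 : x = b <;>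
    simp [h1, h2]

-- A's second loop appends, in first-occurrence order, exactly the names of history that lie in s
lemma loopA_eq (h : List (String × String)) : ∀ (people : List String) (s : PySem.Set String),
    unifyLoopA h people s =
      people ++ (PySem.Set.ofList (h.map Prod.snd)).filter (fun k => decide (k ∈ s)) := by
  induction h with
  | nil => intro people s; simp [unifyLoopA, PySem.Set.ofList_nil]
  | cons bits rest ih =>
    intro people s
    by_cases hk : bits.2 ∈ s
    · have hc : PySem.Set.contains s bits.2 = true := (PySem.Set.contains_iff s bits.2).mpr hk
      simp only [unifyLoopA, hc, if_true, List.map_cons, PySem.Set.ofList_cons, ih,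
        List.filter_cons, hk, decide_true, List.append_assoc, List.singleton_append]
      rw [filter_mem_discard]
    · have hc : PySem.Set.contains s bits.2 = false := by
        simpa using (fun hh => hk ((PySem.Set.contains_iff s bits.2).mp hh))
      simp only [unifyLoopA, hc, Bool.false_eq_true, if_false, List.map_cons,
        PySem.Set.ofList_cons, ih, List.filter_cons, hk, decide_false]
      congr 1
      simp only [PySem.Set.discard, List.filter_filter]
      refine (List.filter_congr ?_).symm
      intro x _
      by_cases h2 : x = bits.2
      · subst h2; simp [hk]
      · simp [h2]

-- invariant of the two first passes: set membership equals the dict's presence flag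
lemma flags (h : List (String × String)) : ∀ (s : PySem.Set String) (d : PySem.Dict String Bool),
    (∀ k, decide (k ∈ s) = d.getD k false) →
    ∀ k,
      decide (k ∈ h.foldl (fun s bits =>
        if bits.1 == "Added" then PySem.Set.add s bits.2 else PySem.Set.discard s bits.2) s) =
      (h.foldl (fun d bits => d.insert bits.2 (bits.1 == "Added")) d).getD k false := by
  induction h with
  | nil => intro s d hinv k; simpa using hinv k
  | cons bits rest ih =>
    intro s d hinv k
    simp only [List.foldl_cons]
    refine ih _ _ ?_ k
    intro j
    by_cases ha : bits.1 = "Added" <;> by_cases hj : j = bits.2 <;>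
      simp [ha, hj, PySem.Set.mem_add, PySem.Set.mem_discard,
        PySem.Dict.getD_insert, ← hinv j]

-- B's value: the flagged keys of the dict, whose keys are the names' first occurrences
lemma alt_eq (h : List (String × String)) :
    unify_people_py_alt h =
      (PySem.Set.ofList (h.map Prod.snd)).filter
        (fun k => (h.foldl (fun d bits => d.insert bits.2 (bits.1 == "Added"))
          PySem.Dict.empty).getD k false) := by
  show (List.filter (fun p => p.2) (List.foldl (fun d bits => d.insert bits.2 (bits.1 == "Added")) PySem.Dict.empty h).items).map (fun p => p.1) = _
  have hnd : (h.foldl (fun d bits => d.insert bits.2 (bits.1 == "Added"))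
      (PySem.Dict.empty : PySem.Dict String Bool)).keys.Nodup :=
    PySem.Dict.nodup_keys_foldl_insert_key h Prod.snd _ _ PySem.Dict.nodup_keys_empty
  rw [PySem.Dict.items_eq_map_keys _ hnd false, List.filter_map, List.map_map]
  rw [PySem.Dict.keys_foldl_insert_key h Prod.snd]
  simp [PySem.Dict.keys_empty, PySem.Set.update_nil_left, Function.comp_def]

-- ===== VERDICT (by name: the statement is the Claim_ definition above) =====
theorem unify_people_py_spec : Claim_equal_unify_people_py := by
  intro history _
  unfold Spec_unify_people_py
  show unify_people_py history = unify_people_py_alt history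
  unfold unify_people_py
  rw [loopA_eq, alt_eq, List.nil_append]
  refine List.filter_congr ?_
  intro x _
  exact flags history PySem.Set.empty PySem.Dict.empty
    (by intro k; simp [PySem.Set.empty, PySem.Dict.getD_empty]) x
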